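-- pv_equiv track=rewrite | github.com/matheuscaputopires/Aurora | _storage/DANILO/tbx-roteirizacao (1)/vrp-cielo/service/orchestrator.py | _check_priority
-- ===== SOURCE A (Python) =====
-- def _check_priority(group):
--     #self.logger.info('_check_priority*************************')
--     order_with_priority = {}
--     for item in group:
--         for company in group[item]:
--             if company['PRIORIDADE_AGENDADO'] == 1:
--                 order_with_priority[item] = []
--                 order_with_priority[item] = group[item]
--
--     for item in group:
--         if not item in order_with_priority:
--             order_with_priority[item] = []
--             order_with_priority[item] = group[item]
--
--     return order_with_priority
-- ===== SOURCE B (Python) =====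
-- def _check_priority(group):
--     def has_priority(item):
--         return any(c['PRIORIDADE_AGENDADO'] == 1 for c in group[item])
--     return {item: group[item] for item in sorted(group, key=lambda item: not has_priority(item))}
-- ===== Notes on version B (the rewrite author's own statement) =====
-- stated objective: simpler
-- what changed: A's two sequential dict-building loops (first pass copying priority groups, second pass copying the rest) are replaced by a single stable sort of the keys on the boolean key 'has no company with PRIORIDADE_AGENDADO == 1', so priority groups come first and the original relative order is kept by stability; the result is one dict comprehension.
import Mathlib
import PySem

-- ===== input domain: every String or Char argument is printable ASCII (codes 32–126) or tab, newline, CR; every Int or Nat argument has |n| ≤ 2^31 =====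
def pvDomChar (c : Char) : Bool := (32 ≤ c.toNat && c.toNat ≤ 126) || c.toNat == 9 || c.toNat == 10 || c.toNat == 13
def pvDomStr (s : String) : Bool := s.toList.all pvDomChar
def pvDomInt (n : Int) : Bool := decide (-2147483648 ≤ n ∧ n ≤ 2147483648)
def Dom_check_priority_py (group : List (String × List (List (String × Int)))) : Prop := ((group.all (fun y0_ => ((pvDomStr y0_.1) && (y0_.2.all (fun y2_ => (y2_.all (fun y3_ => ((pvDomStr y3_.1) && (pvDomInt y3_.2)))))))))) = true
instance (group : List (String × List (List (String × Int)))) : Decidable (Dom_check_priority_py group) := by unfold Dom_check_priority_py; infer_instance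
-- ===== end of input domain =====

-- B replaces A's two sequential dict-building loops by one stable sort of the keys on the
-- boolean "has no priority company" key (priority groups first, original order kept); same cost class.

-- ===== PORT A =====
def check_priority_py (group : List (String × List (List (String × Int)))) : List (String × List (List (String × Int))) :=
  let g : PySem.Dict String (List (List (String × Int))) := PySem.Dict.ofList group
  let owp1 : PySem.Dict String (List (List (String × Int))) :=
    g.keys.foldl (fun owp item =>
      (g.getD item []).foldl (fun owp company =>
        if (PySem.Dict.mk company).getD "PRIORIDADE_AGENDADO" 0 == 1 then
          ((owp.insert item []).insert item (g.getD item []))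
        else owp) owp) PySem.Dict.empty
  let owp2 : PySem.Dict String (List (List (String × Int))) :=
    g.keys.foldl (fun owp item =>
      if !owp.contains item then ((owp.insert item []).insert item (g.getD item []))
      else owp) owp1
  owp2.items

-- ===== PORT B =====
def check_priority_py_alt (group : List (String × List (List (String × Int)))) : List (String × List (List (String × Int))) :=
  let g : PySem.Dict String (List (List (String × Int))) := PySem.Dict.ofList group
  let hasPriority : String → Bool := fun item =>
    (g.getD item []).any (fun company => (PySem.Dict.mk company).getD "PRIORIDADE_AGENDADO" 0 == 1)
  (PySem.List.sorted g.keys (fun item => !hasPriority item) false).map (fun item => (item, g.getD item []))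

-- ===== PRECONDITION & SPEC =====
-- Pre_ excludes exactly the inputs on which A raises KeyError: a company record (in the dict the
-- association list denotes) lacking the key "PRIORIDADE_AGENDADO".
def Pre_check_priority_py (group : List (String × List (List (String × Int)))) : Prop :=
  ∀ p ∈ (PySem.Dict.ofList group).items, ∀ c ∈ p.2, "PRIORIDADE_AGENDADO" ∈ c.map Prod.fst
instance (group : List (String × List (List (String × Int)))) : Decidable (Pre_check_priority_py group) := by unfold Pre_check_priority_py; infer_instance

def pvWitness_check_priority_py : (List (String × List (List (String × Int)))) :=
  [("a", [[("PRIORIDADE_AGENDADO", 0)]]), ("b", [[("PRIORIDADE_AGENDADO", 1)]]), ("c", [])]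

def Spec_check_priority_py (group : List (String × List (List (String × Int)))) (out : List (String × List (List (String × Int)))) : Prop := out = check_priority_py_alt group
instance (group : List (String × List (List (String × Int)))) (out : List (String × List (List (String × Int)))) : Decidable (Spec_check_priority_py group out) := by unfold Spec_check_priority_py; infer_instance

-- ===== CLAIM (what is proved, stated in full; the proofs are below) =====
def Claim_equal_check_priority_py : Prop := ∀ (group : List (String × List (List (String × Int)))), Dom_check_priority_py group → Pre_check_priority_py group → Spec_check_priority_py group (check_priority_py group)

-- ===== LEMMAS AND PROOFS =====

theorem dict_not_contains_fst_ne {κ ν : Type} [BEq κ] [LawfulBEq κ] (d : PySem.Dict κ ν) {k : κ}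
    (h : d.contains k = false) : ∀ p ∈ d.items, (p.1 == k) = false := by
  intro p hp
  rcases Bool.eq_false_or_eq_true (p.1 == k) with hb | hb
  · exfalso
    have hk : p.1 = k := by simpa using hb
    have : d.contains k = true := by
      rw [PySem.Dict.contains_iff_mem_keys]
      simp only [PySem.Dict.keys]
      exact hk ▸ List.mem_map_of_mem hp
    simp [this] at h
  · exact hb
theorem dict_insert_insert {κ ν : Type} [BEq κ] [LawfulBEq κ] (d : PySem.Dict κ ν) (k : κ) (v w : ν) :
    (d.insert k v).insert k w = d.insert k w := by
  apply PySem.Dict.ext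
  by_cases h : d.contains k = true
  · rw [PySem.Dict.items_insert_of_contains _ _ h,
        PySem.Dict.items_insert_of_contains _ _ (PySem.Dict.contains_insert_self d k v),
        PySem.Dict.items_insert_of_contains _ _ h, List.map_map]
    apply List.map_congr_left
    intro p _
    by_cases hp : (p.1 == k) = true <;> simp [hp]
  · have h' : d.contains k = false := by simpa using h
    rw [PySem.Dict.items_insert_of_not_contains _ _ h',
        PySem.Dict.items_insert_of_contains _ _ (PySem.Dict.contains_insert_self d k v),
        PySem.Dict.items_insert_of_not_contains _ _ h', List.map_append]
    congr 1
    · conv_rhs => rw [← List.map_id d.items]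
      apply List.map_congr_left
      intro p hp
      simp [dict_not_contains_fst_ne d h' p hp]
    · simp

theorem inner_loop_collapse {α ν : Type} [BEq α] (q : ν → Bool)
    (cs : List ν) (d : PySem.Dict String (List α)) (i : String) (v : List α) :
    cs.foldl (fun owp c => if q c then ((owp.insert i []).insert i v) else owp) d
      = if cs.any q then ((d.insert i []).insert i v) else d := by
  induction cs generalizing d with
  | nil => simp
  | cons c cs ih =>
    by_cases hc : q c = true
    · simp only [List.foldl_cons, List.any_cons, hc, Bool.true_or, if_true]
      rw [ih]
      by_cases ha : cs.any q = true
      · simp [ha, dict_insert_insert]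
      · simp [ha]
    · have hc' : q c = false := by simpa using hc
      simp [hc', ih]

theorem append_loop {α : Type} (gv : String → List α) (l : List String)
    (d : PySem.Dict String (List α)) (hl : l.Nodup) :
    (l.foldl (fun owp i => if !owp.contains i then ((owp.insert i []).insert i (gv i)) else owp) d).items
      = d.items ++ (l.filter (fun i => !d.contains i)).map (fun i => (i, gv i)) := by
  induction l generalizing d with
  | nil => simp
  | cons i l ih =>
    have hl' : l.Nodup := hl.of_cons
    have hni : i ∉ l := (List.nodup_cons.mp hl).1
    simp only [List.foldl_cons]
    by_cases hc : d.contains i = true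
    · rw [if_neg (by simp [hc])]
      rw [ih _ hl']
      simp [hc]
    · have hc' : d.contains i = false := by simpa using hc
      have hitems : ((d.insert i []).insert i (gv i)).items = d.items ++ [(i, gv i)] := by
        rw [dict_insert_insert, PySem.Dict.items_insert_of_not_contains _ _ hc']
      rw [if_pos (by simp [hc'])]
      rw [ih _ hl', hitems]
      have hfc : l.filter (fun j => !((d.insert i []).insert i (gv i)).contains j)
          = l.filter (fun j => !d.contains j) := by
        apply List.filter_congr
        intro j hj
        have hne : (j == i) = false := by
          simp only [beq_eq_false_iff_ne, ne_eq]
          intro he; exact hni (he ▸ hj)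
        rw [dict_insert_insert, PySem.Dict.contains_insert, hne]
        simp
      rw [hfc]
      simp [hc', List.append_assoc]

theorem insertBy_bool {α : Type} (key : α → Bool) (x : α) (F T : List α)
    (hF : ∀ a ∈ F, key a = false) (hT : ∀ a ∈ T, key a = true) :
    PySem.List.insertBy (fun a b => decide (key a < key b)) x (F ++ T)
      = if key x then (F ++ T) ++ [x] else F ++ x :: T := by
  by_cases hx : key x = true
  · rw [if_pos hx]
    apply PySem.List.insertBy_of_forall_not_before
    intro y hy
    rcases List.mem_append.mp hy with h | h
    · simp [hx, hF y h]
    · simp [hx, hT y h]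
  · have hx' : key x = false := by simpa using hx
    rw [if_neg hx]
    induction F with
    | nil =>
      cases T with
      | nil => rfl
      | cons y ys =>
        show PySem.List.insertBy _ x (y :: ys) = x :: y :: ys
        rw [show PySem.List.insertBy (fun a b => decide (key a < key b)) x (y :: ys)
            = if decide (key x < key y) then x :: y :: ys
              else y :: PySem.List.insertBy (fun a b => decide (key a < key b)) x ys from rfl]
        rw [if_pos (by rw [hx', hT y (by simp)]; decide)]
    | cons f F ih =>
      have hkf : key f = false := hF f (by simp)
      have hb : decide (key x < key f) = false := by simp [hx', hkf]
      show PySem.List.insertBy _ x (f :: (F ++ T)) = f :: (F ++ x :: T)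
      rw [show PySem.List.insertBy (fun a b => decide (key a < key b)) x (f :: (F ++ T))
          = if decide (key x < key f) then x :: f :: (F ++ T)
            else f :: PySem.List.insertBy (fun a b => decide (key a < key b)) x (F ++ T) from rfl,
         hb]
      simp only [Bool.false_eq_true, if_false]
      rw [ih (fun a ha => hF a (by simp [ha]))]

theorem foldl_insertBy_bool {α : Type} (key : α → Bool) (xs : List α) : ∀ (F T : List α),
    (∀ a ∈ F, key a = false) → (∀ a ∈ T, key a = true) →
    xs.foldl (fun acc x => PySem.List.insertBy (fun a b => decide (key a < key b)) x acc) (F ++ T)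
      = (F ++ xs.filter (fun x => !key x)) ++ (T ++ xs.filter key) := by
  induction xs with
  | nil => intro F T _ _; simp
  | cons x xs ih =>
    intro F T hF hT
    simp only [List.foldl_cons]
    rw [insertBy_bool key x F T hF hT]
    by_cases hx : key x = true
    · rw [if_pos hx]
      have : (F ++ T) ++ [x] = F ++ (T ++ [x]) := by simp [List.append_assoc]
      rw [this, ih F (T ++ [x]) hF (by
        intro a ha
        rcases List.mem_append.mp ha with h | h
        · exact hT a h
        · simp at h; subst h; exact hx)]
      simp [hx, List.append_assoc]
    · have hx' : key x = false := by simpa using hx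
      rw [if_neg hx]
      have : F ++ x :: T = (F ++ [x]) ++ T := by simp
      rw [this, ih (F ++ [x]) T (by
        intro a ha
        rcases List.mem_append.mp ha with h | h
        · exact hF a h
        · simp at h; subst h; exact hx') hT]
      simp [hx', List.append_assoc]

-- Python's stable sort on a boolean key is exactly the stable partition (false-key items first).
theorem sorted_bool {α : Type} (key : α → Bool) (xs : List α) :
    PySem.List.sorted xs key false = xs.filter (fun x => !key x) ++ xs.filter key := by
  rw [PySem.List.sorted_eq_foldl_insertBy]
  simpa using foldl_insertBy_bool key xs [] [] (by simp) (by simp)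

-- ===== VERDICT (by name: the statement is the Claim_ definition above) =====
theorem check_priority_py_spec : Claim_equal_check_priority_py := by
  intro group _ _
  show check_priority_py group = check_priority_py_alt group
  simp only [check_priority_py, check_priority_py_alt]
  set g := PySem.Dict.ofList group with hg
  set q : List (String × Int) → Bool :=
    fun company => (PySem.Dict.mk company).getD "PRIORIDADE_AGENDADO" 0 == 1 with hq
  set hp : String → Bool := fun item => (g.getD item []).any q with hhp
  have h1 : (fun (owp : PySem.Dict String (List (List (String × Int)))) (item : String) =>
        List.foldl (fun owp company =>
          if q company = true then (owp.insert item []).insert item (g.getD item []) else owp)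
          owp (g.getD item []))
      = (fun owp item =>
          if hp item = true then (owp.insert item []).insert item (g.getD item []) else owp) := by
    funext owp item
    exact inner_loop_collapse q (g.getD item []) owp item (g.getD item [])
  rw [h1]
  have h2 : (fun (owp : PySem.Dict String (List (List (String × Int)))) (item : String) =>
        if hp item = true then (owp.insert item []).insert item (g.getD item []) else owp)
      = (fun owp item => if hp item = true then owp.insert item (g.getD item []) else owp) := by
    funext owp item
    by_cases h : hp item = true <;> simp [h, dict_insert_insert]
  rw [h2]
  have h3 := PySem.List.foldl_if_eq_foldl_filter hp
    (fun (owp : PySem.Dict String (List (List (String × Int)))) item =>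
      owp.insert item (g.getD item [])) g.keys PySem.Dict.empty
  rw [h3]
  rw [append_loop (fun i => g.getD i []) g.keys _ (PySem.Dict.nodup_keys_ofList group)]
  have hitems1 : (List.foldl (fun owp item => owp.insert item (g.getD item []))
        PySem.Dict.empty (g.keys.filter hp)).items
      = (g.keys.filter hp).map (fun a => (a, g.getD a [])) := by
    have := PySem.Dict.items_foldl_insert_fresh (g.keys.filter hp) (fun a => a)
      (fun a => g.getD a []) PySem.Dict.empty
      (fun a _ => PySem.Dict.contains_empty a)
      (by simpa using (PySem.Dict.nodup_keys_ofList group).filter hp)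
    simpa using this
  have hcont : ∀ i ∈ g.keys, (List.foldl (fun owp item => owp.insert item (g.getD item []))
        PySem.Dict.empty (g.keys.filter hp)).contains i = hp i := by
    intro i hi
    rw [PySem.Dict.contains_eq_decide_mem_keys]
    have hk : (List.foldl (fun owp item => owp.insert item (g.getD item []))
          PySem.Dict.empty (g.keys.filter hp)).keys = g.keys.filter hp := by
      rw [show (List.foldl (fun owp item => owp.insert item (g.getD item []))
            PySem.Dict.empty (g.keys.filter hp)).keys
          = (List.foldl (fun owp item => owp.insert item (g.getD item []))
            PySem.Dict.empty (g.keys.filter hp)).items.map (fun p => p.1) from rfl,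
          hitems1, List.map_map]
      simp [Function.comp_def]
    rw [hk]
    by_cases h : hp i = true <;> simp [List.mem_filter, hi, h]
  have hfilt : g.keys.filter (fun i => !(List.foldl (fun owp item => owp.insert item (g.getD item []))
        PySem.Dict.empty (g.keys.filter hp)).contains i)
      = g.keys.filter (fun i => !hp i) := by
    apply List.filter_congr
    intro i hi
    rw [hcont i hi]
  rw [hfilt, hitems1, sorted_bool, List.map_append]
  simp [hhp, Bool.not_not]
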